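-- pv_equiv track=rewrite | github.com/ThreeMonth03/DSW_Translation_tool | src/tree_utils.py | map_field_values_no_filter
-- ===== SOURCE A (Python) =====
-- def map_field_values_no_filter(po_refs):
--     fields = {}
--     for ref in po_refs:
--         field = ref["field"]
--         if field not in fields:
--             fields[field] = {
--                 "msgid": ref.get("msgid", ""),
--                 "msgstr": ref.get("msgstr", ""),
--             }
--     return fields
-- ===== SOURCE B (Python) =====
-- def map_field_values_no_filter(po_refs):
--     refs = list(po_refs)
--
--     def first_ref(f):
--         return next(r for r in refs if r["field"] == f)
--
--     result = {}
--     for f in dict.fromkeys(r["field"] for r in refs):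
--         r = first_ref(f)
--         result[f] = {"msgid": r.get("msgid", ""), "msgstr": r.get("msgstr", "")}
--     return result
-- ===== Notes on version B (the rewrite author's own statement) =====
-- stated objective: alternative
-- what changed: Instead of one forward pass guarded by a membership test, B first computes the ordered list of distinct field names (dict.fromkeys) and then, for each distinct field, searches the list for its first occurrence to build the value.
import Mathlib
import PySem

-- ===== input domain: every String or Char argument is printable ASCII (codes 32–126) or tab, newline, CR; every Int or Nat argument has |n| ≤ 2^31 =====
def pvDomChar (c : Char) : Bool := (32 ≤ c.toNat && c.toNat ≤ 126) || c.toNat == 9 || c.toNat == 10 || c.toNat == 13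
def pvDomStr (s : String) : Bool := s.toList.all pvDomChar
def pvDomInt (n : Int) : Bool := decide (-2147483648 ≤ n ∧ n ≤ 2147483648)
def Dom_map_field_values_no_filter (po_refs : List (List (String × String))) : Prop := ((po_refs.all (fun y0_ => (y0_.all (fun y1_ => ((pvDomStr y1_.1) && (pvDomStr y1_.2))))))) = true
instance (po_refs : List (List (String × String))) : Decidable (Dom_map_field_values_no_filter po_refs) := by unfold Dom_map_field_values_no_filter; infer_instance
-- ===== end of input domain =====

-- B replaces A's single guarded forward pass by a two-phase plan: distinct field names in
-- first-occurrence order, then a search for each field's first occurrence (objective: alternative).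

-- shared accessors for a ref (a Python dict given as an association list):
-- pvFld r = r["field"] (exact on Pre_, where "field" is present; Dict.ofList is dict(pairs)),
-- pvVal r = {"msgid": r.get("msgid",""), "msgstr": r.get("msgstr","")}
def pvFld (r : List (String × String)) : String := (PySem.Dict.ofList r).getD "field" ""
def pvVal (r : List (String × String)) : List (String × String) :=
  [("msgid", (PySem.Dict.ofList r).getD "msgid" ""), ("msgstr", (PySem.Dict.ofList r).getD "msgstr" "")]

-- ===== PORT A =====
def map_field_values_no_filter (po_refs : List (List (String × String))) : List (String × List (String × String)) :=
  (po_refs.foldl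
    (fun fields ref =>
      if fields.contains (pvFld ref) then fields
      else fields.insert (pvFld ref) (pvVal ref))
    PySem.Dict.empty).items

-- ===== PORT B =====
-- next(r for r in refs if r["field"] == f): f always occurs, so the .getD [] default is never used
def map_field_values_no_filter_alt (po_refs : List (List (String × String))) : List (String × List (String × String)) :=
  (PySem.Set.ofList (po_refs.map pvFld)).map
    (fun f => (f, pvVal ((po_refs.find? (fun r => pvFld r == f)).getD [])))

-- ===== PRECONDITION & SPEC =====
-- Pre_ excludes exactly the inputs where some ref lacks the key "field": there Python A raises KeyError.
def Pre_map_field_values_no_filter (po_refs : List (List (String × String))) : Prop :=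
  (po_refs.all (fun ref => ref.any (fun p => p.1 == "field"))) = true
instance (po_refs : List (List (String × String))) : Decidable (Pre_map_field_values_no_filter po_refs) := by unfold Pre_map_field_values_no_filter; infer_instance
def pvWitness_map_field_values_no_filter : (List (List (String × String))) :=
  [[("field", "a"), ("msgid", "hi")], [("field", "b"), ("msgstr", "yo")], [("field", "a"), ("msgid", "zz")]]

def Spec_map_field_values_no_filter (po_refs : List (List (String × String))) (out : List (String × List (String × String))) : Prop := out = map_field_values_no_filter_alt po_refs
instance (po_refs : List (List (String × String))) (out : List (String × List (String × String))) : Decidable (Spec_map_field_values_no_filter po_refs out) := by unfold Spec_map_field_values_no_filter; infer_instance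

-- ===== CLAIM (what is proved, stated in full; the proofs are below) =====
def Claim_equal_map_field_values_no_filter : Prop := ∀ (po_refs : List (List (String × String))), Dom_map_field_values_no_filter po_refs → Pre_map_field_values_no_filter po_refs → Spec_map_field_values_no_filter po_refs (map_field_values_no_filter po_refs)

-- ===== LEMMAS AND PROOFS =====

-- A's loop body, named for the proofs (definitionally the lambda in the port)
def pvStep (d : PySem.Dict String (List (String × String))) (r : List (String × String)) :
    PySem.Dict String (List (String × String)) :=
  if d.contains (pvFld r) then d else d.insert (pvFld r) (pvVal r)

-- the common normal form: first-seen fields with the value taken at the point of first occurrence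
def pvGo : List (List (String × String)) → List String → List (String × List (String × String))
  | [], _ => []
  | r :: t, seen =>
      if pvFld r ∈ seen then pvGo t seen
      else (pvFld r, pvVal r) :: pvGo t (seen ++ [pvFld r])

theorem pvA_items (l : List (List (String × String))) :
    ∀ d : PySem.Dict String (List (String × String)),
      (l.foldl pvStep d).items = d.items ++ pvGo l d.keys := by
  induction l with
  | nil => intro d; simp [pvGo]
  | cons r t ih =>
      intro d
      simp only [List.foldl_cons, pvGo]
      by_cases h : pvFld r ∈ d.keys
      · have hc : d.contains (pvFld r) = true := by
          rw [PySem.Dict.contains_eq_decide_mem_keys]; simpa using h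
        simp [pvStep, hc, h, ih]
      · have hc : d.contains (pvFld r) = false := by
          rw [PySem.Dict.contains_eq_decide_mem_keys]; simpa using h
        rw [pvStep, hc]
        simp only [if_neg (by simp : ¬ (false = true)), if_neg h]
        rw [ih, PySem.Dict.items_insert_of_not_contains (h := hc),
            PySem.Dict.keys_insert_of_not_contains (h := hc)]
        simp

theorem pvOfList_concat {α : Type} [DecidableEq α] (xs : List α) (x : α) :
    PySem.Set.ofList (xs ++ [x]) = PySem.Set.add (PySem.Set.ofList xs) x := by
  rw [PySem.Set.ofList_append, PySem.Set.update_cons, PySem.Set.update_nil]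

theorem pvB_go (t : List (List (String × String))) :
    ∀ p : List (List (String × String)),
      pvGo t (PySem.Set.ofList (p.map pvFld)) =
        ((PySem.Set.ofList ((p ++ t).map pvFld)).drop (PySem.Set.ofList (p.map pvFld)).length).map
          (fun f => (f, pvVal (((p ++ t).find? (fun r => pvFld r == f)).getD []))) := by
  induction t with
  | nil => intro p; simp [pvGo]
  | cons r t' ih =>
      intro p
      have hsplit : p ++ r :: t' = (p ++ [r]) ++ t' := by simp
      have hofl : PySem.Set.ofList ((p ++ [r]).map pvFld)
          = PySem.Set.add (PySem.Set.ofList (p.map pvFld)) (pvFld r) := by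
        rw [List.map_append]; exact pvOfList_concat _ _
      by_cases h : pvFld r ∈ PySem.Set.ofList (p.map pvFld)
      · have hadd : PySem.Set.ofList ((p ++ [r]).map pvFld) = PySem.Set.ofList (p.map pvFld) := by
          rw [hofl, PySem.Set.add]; simp [h]
        have := ih (p ++ [r])
        rw [hadd, hsplit] at *
        simpa [pvGo, h] using this
      · have hadd : PySem.Set.ofList ((p ++ [r]).map pvFld)
            = PySem.Set.ofList (p.map pvFld) ++ [pvFld r] := by
          rw [hofl, PySem.Set.add]; simp [h]
        -- full set is (S ++ [pvFld r]) ++ rest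
        have hfull : PySem.Set.ofList ((p ++ r :: t').map pvFld)
            = PySem.Set.update (PySem.Set.ofList (p.map pvFld) ++ [pvFld r]) (t'.map pvFld) := by
          rw [hsplit, List.map_append, PySem.Set.ofList_append, hadd]
        obtain ⟨rest, hrest⟩ : ∃ rest, PySem.Set.ofList ((p ++ r :: t').map pvFld)
            = (PySem.Set.ofList (p.map pvFld) ++ [pvFld r]) ++ rest := by
          rw [hfull, PySem.Set.update_eq_append_filter]; exact ⟨_, rfl⟩
        -- first occurrence of pvFld r in p ++ r :: t' is r
        have hnp : (p.find? (fun x => pvFld x == pvFld r)) = none := by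
          rw [List.find?_eq_none]
          intro x hx
          simp only [beq_iff_eq]
          intro hf
          exact h (by rw [PySem.Set.mem_ofList]; exact hf ▸ List.mem_map_of_mem hx)
        have hfind : ((p ++ r :: t').find? (fun x => pvFld x == pvFld r)).getD [] = r := by
          rw [List.find?_append, hnp]; simp
        rw [pvGo, if_neg h, ← hadd, ih (p ++ [r]), ← hsplit, hrest]
        have h1 : ((PySem.Set.ofList (p.map pvFld) ++ [pvFld r]) ++ rest).drop
            (PySem.Set.ofList (p.map pvFld)).length = pvFld r :: rest := by
          rw [List.append_assoc, List.drop_left]; simp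
        have h2 : ((PySem.Set.ofList (p.map pvFld) ++ [pvFld r]) ++ rest).drop
            (PySem.Set.ofList ((p ++ [r]).map pvFld)).length = rest := by
          rw [hadd, List.drop_left]
        rw [h1, h2, List.map_cons, hfind]

-- ===== VERDICT (by name: the statement is the Claim_ definition above) =====
theorem map_field_values_no_filter_spec : Claim_equal_map_field_values_no_filter := by
  intro po_refs _ _
  show map_field_values_no_filter po_refs = map_field_values_no_filter_alt po_refs
  have hA : map_field_values_no_filter po_refs = pvGo po_refs [] := by
    unfold map_field_values_no_filter
    rw [show (fun (fields : PySem.Dict String (List (String × String))) ref =>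
          if fields.contains (pvFld ref) then fields
          else fields.insert (pvFld ref) (pvVal ref)) = pvStep from rfl,
        pvA_items]
    rfl
  have hB := pvB_go po_refs []
  simp only [List.map_nil, List.nil_append,
    show PySem.Set.ofList ([] : List String) = [] from rfl] at hB
  rw [hA, hB]
  rfl
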